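-- pv_equiv track=rewrite | github.com/kastger/spiking-neural-network | wine-accuracy.py | convert_rates_to_answers
-- ===== SOURCE A (Python) =====
-- def convert_rates_to_answers(firingRates):
--     answers = []
--     totalNumberOfAnswers = len(firingRates[0])
--
--     # Loop through all answers (0 to 89)
--     for eachAnswer in range (0, totalNumberOfAnswers):
--         answer = 0
--
--         # Get spikes of each neuron
--         firstOutputLayerNeuronSpike = firingRates[0][eachAnswer]
--         secondOutputLayerNeuronSpike = firingRates[1][eachAnswer]
--         thirdOutputLayerNeuronSpike = firingRates[2][eachAnswer]
--
--         # Determine the answer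
--         if (firstOutputLayerNeuronSpike > secondOutputLayerNeuronSpike) and (firstOutputLayerNeuronSpike > thirdOutputLayerNeuronSpike): #1 > 2&3
--             answer = 1
--         elif (secondOutputLayerNeuronSpike > firstOutputLayerNeuronSpike) and (secondOutputLayerNeuronSpike > thirdOutputLayerNeuronSpike): #2 > 1&3
--             answer = 2
--         elif (thirdOutputLayerNeuronSpike > firstOutputLayerNeuronSpike) and (thirdOutputLayerNeuronSpike > secondOutputLayerNeuronSpike): #3 > 1&2
--             answer = 3
--         else: answer = 0
--
--         # Save the answers into an array
--         answers = answers + [answer]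
--
--     return answers
-- ===== SOURCE B (Python) =====
-- def convert_rates_to_answers(firingRates):
--     answers = []
--     for column in zip(firingRates[0], firingRates[1], firingRates[2]):
--         ranked = sorted(enumerate(column, 1), key=lambda p: p[1], reverse=True)
--         answers.append(ranked[0][0] if ranked[0][1] > ranked[1][1] else 0)
--     return answers
-- ===== Notes on version B (the rewrite author's own statement) =====
-- stated objective: alternative
-- what changed: Per column, B zips the three rows and stable-sorts the (neuron, value) pairs by value descending, answering with the top neuron when its value strictly beats the runner-up, instead of A's pairwise if/elif comparison cascade over indexed rows.
-- outside the precondition, e.g. on convert_rates_to_answers([[]]): A returns [], B raises IndexError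
import Mathlib
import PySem

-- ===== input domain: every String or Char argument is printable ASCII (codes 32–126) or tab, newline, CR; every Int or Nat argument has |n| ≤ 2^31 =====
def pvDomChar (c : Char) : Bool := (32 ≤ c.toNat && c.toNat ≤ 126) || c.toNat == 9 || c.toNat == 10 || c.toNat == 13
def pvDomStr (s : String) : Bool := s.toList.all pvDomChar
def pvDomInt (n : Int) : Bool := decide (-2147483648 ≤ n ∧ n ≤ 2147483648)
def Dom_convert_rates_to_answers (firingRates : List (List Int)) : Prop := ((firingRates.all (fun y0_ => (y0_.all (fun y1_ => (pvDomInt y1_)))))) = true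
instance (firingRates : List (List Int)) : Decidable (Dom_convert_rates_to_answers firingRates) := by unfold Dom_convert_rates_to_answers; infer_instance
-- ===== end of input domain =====

-- B zips the three rows into columns and, per column, sorts the (index, value) pairs by value
-- descending and compares the two top-ranked values (alternative decomposition; identical output).

-- ===== PORT A =====
-- firingRates[k] (k = 0,1,2); Pre_ guarantees the index is in range, so getD [] is never the raising case
def pvRow (firingRates : List (List Int)) (k : Int) : List Int :=
  (PySem.List.pyGet? firingRates k).getD []

def convert_rates_to_answers (firingRates : List (List Int)) : List Int :=
  let totalNumberOfAnswers : Int := ((pvRow firingRates 0).length : Int)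
  (PySem.List.pyRange 0 totalNumberOfAnswers 1).foldl (fun answers eachAnswer =>
    let first := PySem.List.pyGetD (pvRow firingRates 0) eachAnswer 0
    let second := PySem.List.pyGetD (pvRow firingRates 1) eachAnswer 0
    let third := PySem.List.pyGetD (pvRow firingRates 2) eachAnswer 0
    let answer : Int :=
      if first > second ∧ first > third then 1
      else if second > first ∧ second > third then 2
      else if third > first ∧ third > second then 3
      else 0
    answers ++ [answer]) []

-- ===== PORT B =====
-- per column: rank the (neuron, value) pairs by value descending; winner iff top value strictly
-- beats the runner-up. ranked[0] / ranked[1] always exist (three pairs), so pyGetD's default is dead.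
def pvRank (column : Int × Int × Int) : Int :=
  let ranked := PySem.List.sorted
    (PySem.List.enumerate [column.1, column.2.1, column.2.2] 1) (fun p => p.2) true
  let top := PySem.List.pyGetD ranked 0 (0, 0)
  let runnerUp := PySem.List.pyGetD ranked 1 (0, 0)
  if top.2 > runnerUp.2 then top.1 else 0

def convert_rates_to_answers_alt (firingRates : List (List Int)) : List Int :=
  let r0 := (PySem.List.pyGet? firingRates 0).getD []
  let r1 := (PySem.List.pyGet? firingRates 1).getD []
  let r2 := (PySem.List.pyGet? firingRates 2).getD []
  (r0.zip (r1.zip r2)).foldl (fun answers column => answers ++ [pvRank column]) []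

-- ===== PRECONDITION & SPEC =====
-- Python A raises IndexError when firingRates has fewer than 3 rows, or when row 1 or row 2
-- is shorter than row 0 (the loop indexes all three rows up to len(firingRates[0])).
-- Pre_ also excludes malformed inputs with fewer than 3 rows whose first row is empty: there the
-- loop body never runs, so A returns an empty result without touching the missing rows, while B,
-- which reads all three rows up front, raises IndexError on such input.
def Pre_convert_rates_to_answers (firingRates : List (List Int)) : Prop :=
  3 ≤ firingRates.length ∧
  (firingRates.getD 0 []).length ≤ (firingRates.getD 1 []).length ∧
  (firingRates.getD 0 []).length ≤ (firingRates.getD 2 []).length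
instance (firingRates : List (List Int)) : Decidable (Pre_convert_rates_to_answers firingRates) := by unfold Pre_convert_rates_to_answers; infer_instance

def pvWitness_convert_rates_to_answers : List (List Int) := [[5, 1, 2, 2], [3, 7, 2, 2], [1, 1, 9, 2]]

def Spec_convert_rates_to_answers (firingRates : List (List Int)) (out : List Int) : Prop := out = convert_rates_to_answers_alt firingRates
instance (firingRates : List (List Int)) (out : List Int) : Decidable (Spec_convert_rates_to_answers firingRates out) := by unfold Spec_convert_rates_to_answers; infer_instance

-- ===== CLAIM (what is proved, stated in full; the proofs are below) =====
def Claim_equal_convert_rates_to_answers : Prop := ∀ (firingRates : List (List Int)), Dom_convert_rates_to_answers firingRates → Pre_convert_rates_to_answers firingRates → Spec_convert_rates_to_answers firingRates (convert_rates_to_answers firingRates)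

-- ===== LEMMAS AND PROOFS =====

-- A's comparison cascade agrees with B's sort-the-column ranking on any three ints
set_option maxHeartbeats 2000000 in
theorem pvRank_eq (a b c : Int) :
    (if a > b ∧ a > c then (1 : Int)
     else if b > a ∧ b > c then 2
     else if c > a ∧ c > b then 3
     else 0) = pvRank (a, b, c) := by
  by_cases hab : a < b <;> by_cases hba : b < a <;> by_cases hac : a < c <;>
    by_cases hca : c < a <;> by_cases hbc : b < c <;> by_cases hcb : c < b <;>
    (try omega) <;>
    (try simp_all [pvRank, PySem.List.enumerate_cons, PySem.List.enumerate_nil,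
      PySem.List.sorted_rev_eq_foldl_insertBy, PySem.List.insertBy,
      PySem.List.pyGetD, PySem.List.pyIdx?])
  all_goals try omega
  all_goals try (split_ifs at * <;>
    (try simp_all [PySem.List.insertBy, PySem.List.pyGetD, PySem.List.pyIdx?]))
  all_goals try omega
  all_goals try (split_ifs at * <;>
    (try simp_all [PySem.List.insertBy, PySem.List.pyGetD, PySem.List.pyIdx?]))
  all_goals omega

-- index loop over range(len(r0)) = fold over the zipped columns (rows 1,2 at least as long as row 0)
theorem pvRange_eq_zip (r0 r1 r2 : List Int) (f : Int → Int → Int → Int)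
    (h1 : r0.length ≤ r1.length) (h2 : r0.length ≤ r2.length) :
    (PySem.List.pyRange 0 (r0.length : Int) 1).map
      (fun i => f (PySem.List.pyGetD r0 i 0) (PySem.List.pyGetD r1 i 0) (PySem.List.pyGetD r2 i 0))
      = (r0.zip (r1.zip r2)).map (fun p => f p.1 p.2.1 p.2.2) := by
  apply List.ext_getElem
  · simp [PySem.List.length_pyRange_one, List.length_zip]; omega
  · intro k hk1 hk2
    simp only [List.getElem_map, PySem.List.getElem_pyRange_one, List.getElem_zip]
    have hk0 : k < r0.length := by
      simpa [PySem.List.length_pyRange_one] using hk1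
    rw [PySem.List.pyGetD_eq_getElem _ _ (by omega) (by push_cast; omega),
        PySem.List.pyGetD_eq_getElem _ _ (by omega) (by push_cast; omega),
        PySem.List.pyGetD_eq_getElem _ _ (by omega) (by push_cast; omega)]
    simp

-- ===== VERDICT (by name: the statement is the Claim_ definition above) =====
theorem convert_rates_to_answers_spec : Claim_equal_convert_rates_to_answers := by
  intro fr _ hpre
  obtain ⟨h3, h1, h2⟩ := hpre
  unfold Spec_convert_rates_to_answers convert_rates_to_answers convert_rates_to_answers_alt pvRow
  rw [PySem.List.foldl_append_singleton_eq_map, PySem.List.foldl_append_singleton_eq_map]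
  simp only [List.nil_append]
  obtain ⟨x0, x1, x2, t, rfl⟩ : ∃ x0 x1 x2 t, fr = x0 :: x1 :: x2 :: t := by
    match fr, h3 with
    | x0 :: x1 :: x2 :: t, _ => exact ⟨x0, x1, x2, t, rfl⟩
  simp only [List.getD, List.getElem?_cons_zero, List.getElem?_cons_succ, Option.getD_some] at h1 h2
  have e0 : PySem.List.pyGet? (x0 :: x1 :: x2 :: t) (0 : Int) = some x0 := by
    simp [PySem.List.pyGet?, PySem.List.pyIdx?]; rw [if_pos (by omega)]; simp
  have e1 : PySem.List.pyGet? (x0 :: x1 :: x2 :: t) (1 : Int) = some x1 := by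
    simp [PySem.List.pyGet?, PySem.List.pyIdx?]; rw [if_pos (by omega)]; simp
  have e2 : PySem.List.pyGet? (x0 :: x1 :: x2 :: t) (2 : Int) = some x2 := by
    simp [PySem.List.pyGet?, PySem.List.pyIdx?]; rw [if_pos (by omega)]; simp
  rw [e0, e1, e2]
  simp only [Option.getD_some]
  refine Eq.trans (pvRange_eq_zip x0 x1 x2
    (fun first second third =>
      if first > second ∧ first > third then (1 : Int)
      else if second > first ∧ second > third then 2
      else if third > first ∧ third > second then 3
      else 0) h1 h2) ?_
  exact List.map_congr_left (fun p _ => pvRank_eq p.1 p.2.1 p.2.2)
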